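-- pv_equiv track=rewrite | github.com/chris-arsenault/advent-of-code-2025 | day4/main.py | part2
-- ===== SOURCE A (Python) =====
-- from collections import deque
--
-- NEIGHBORS = [
--     (-1, -1),
--     (-1, 0),
--     (-1, 1),
--     (0, -1),
--     (0, 1),
--     (1, -1),
--     (1, 0),
--     (1, 1),
-- ]
--
-- def neighbor_counts(rolls: set[tuple[int, int]]) -> dict[tuple[int, int], int]:
--     counts: dict[tuple[int, int], int] = {pos: 0 for pos in rolls}
--     for r, c in rolls:
--         cnt = 0
--         for dr, dc in NEIGHBORS:
--             if (r + dr, c + dc) in rolls: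
--                 cnt += 1
--         counts[(r, c)] = cnt
--     return counts
--
-- def part2(rolls: set[tuple[int, int]]) -> int:
--     counts = neighbor_counts(rolls)
--     removed: set[tuple[int, int]] = set()
--     q: deque[tuple[int, int]] = deque([pos for pos, cnt in counts.items() if cnt < 4])
--
--     while q:
--         pos = q.popleft()
--         if pos in removed:
--             continue
--         removed.add(pos)
--         r, c = pos
--         for dr, dc in NEIGHBORS:
--             nbr = (r + dr, c + dc)
--             if nbr in rolls and nbr not in removed:
--                 counts[nbr] -= 1
--                 if counts[nbr] < 4:
--                     q.append(nbr)
--     return len(removed)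
-- ===== SOURCE B (Python) =====
-- NEIGHBORS = [
--     (-1, -1),
--     (-1, 0),
--     (-1, 1),
--     (0, -1),
--     (0, 1),
--     (1, -1),
--     (1, 0),
--     (1, 1),
-- ]
--
-- def part2(rolls: set[tuple[int, int]]) -> int:
--     remaining = set(rolls)
--     while True:
--         doomed = [
--             (r, c)
--             for r, c in remaining
--             if sum(1 for dr, dc in NEIGHBORS if (r + dr, c + dc) in remaining) < 4
--         ]
--         if not doomed:
--             return len(rolls) - len(remaining)
--         remaining.difference_update(doomed)
-- ===== Notes on version B (the rewrite author's own statement) =====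
-- stated objective: simpler
-- what changed: Replaces A's precomputed neighbor-count table plus deque worklist with repeated whole-set peeling passes: each pass recounts live neighbors against a snapshot of the remaining set, removes every cell with fewer than 4, and stops at the fixed point, returning len(rolls) - len(remaining).
import Mathlib
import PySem

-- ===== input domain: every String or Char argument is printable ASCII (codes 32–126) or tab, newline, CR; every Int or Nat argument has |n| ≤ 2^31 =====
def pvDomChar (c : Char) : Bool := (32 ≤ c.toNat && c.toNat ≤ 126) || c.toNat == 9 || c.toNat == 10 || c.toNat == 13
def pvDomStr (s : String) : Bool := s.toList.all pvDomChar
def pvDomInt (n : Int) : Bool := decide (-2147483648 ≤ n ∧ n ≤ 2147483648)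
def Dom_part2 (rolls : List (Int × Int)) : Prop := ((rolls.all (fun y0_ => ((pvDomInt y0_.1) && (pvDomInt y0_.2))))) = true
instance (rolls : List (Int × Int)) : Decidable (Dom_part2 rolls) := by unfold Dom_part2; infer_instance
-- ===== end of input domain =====

-- B replaces A's precomputed neighbor-count table and deque worklist by repeated
-- whole-set peeling passes to the same fixed point (objective: simpler).
-- The set argument is modelled as a list of its distinct elements; both ports
-- consume it only in order-insensitive ways, matching Python set semantics.

-- ===== PORT A =====
def pvNEIGHBORS : List (Int × Int) :=
  [(-1, -1), (-1, 0), (-1, 1), (0, -1), (0, 1), (1, -1), (1, 0), (1, 1)]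

def neighbor_counts (rolls : PySem.Set (Int × Int)) : PySem.Dict (Int × Int) Int :=
  let counts := rolls.foldl (fun d pos => d.insert pos (0 : Int)) PySem.Dict.empty
  rolls.foldl (fun d p =>
    d.insert p
      (pvNEIGHBORS.foldl
        (fun cnt dd =>
          if PySem.Set.contains rolls (p.1 + dd.1, p.2 + dd.2) then cnt + 1 else cnt)
        (0 : Int))) counts

-- the body of A's inner `for dr, dc in NEIGHBORS:` loop (counts[nbr] -= 1 is total
-- here via getD: the key nbr is always present since nbr ∈ rolls = the dict's key set)
def part2Step (rolls removed : PySem.Set (Int × Int)) (pos : Int × Int)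
    (st : PySem.Dict (Int × Int) Int × List (Int × Int)) (dd : Int × Int) :
    PySem.Dict (Int × Int) Int × List (Int × Int) :=
  let nbr := (pos.1 + dd.1, pos.2 + dd.2)
  if PySem.Set.contains rolls nbr && !(PySem.Set.contains removed nbr) then
    if st.1.getD nbr 0 - 1 < 4 then
      (st.1.insert nbr (st.1.getD nbr 0 - 1), st.2 ++ [nbr])
    else
      (st.1.insert nbr (st.1.getD nbr 0 - 1), st.2)
  else st

-- A's `while q:` loop; the fuel is a totality guard only (the proofs show the
-- queue empties before the fuel part2 supplies runs out)
def part2Loop (rolls : PySem.Set (Int × Int)) :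
    Nat → PySem.Dict (Int × Int) Int → PySem.Set (Int × Int) → List (Int × Int) →
      PySem.Set (Int × Int)
  | 0, _, removed, _ => removed
  | _ + 1, _, removed, [] => removed
  | fuel + 1, counts, removed, pos :: rest =>
    if PySem.Set.contains removed pos then
      part2Loop rolls fuel counts removed rest
    else
      let removed' := PySem.Set.add removed pos
      let st := pvNEIGHBORS.foldl (part2Step rolls removed' pos) (counts, rest)
      part2Loop rolls fuel st.1 removed' st.2

def part2 (rolls : List (Int × Int)) : Int :=
  let rollsSet := PySem.Set.ofList rolls
  let counts := neighbor_counts rollsSet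
  let q := (counts.items.filter (fun pc => pc.2 < 4)).map (fun pc => pc.1)
  let removed :=
    part2Loop rollsSet (q.length + 8 * rollsSet.length + 1) counts PySem.Set.empty q
  (removed.length : Int)

-- ===== PORT B =====
-- B's `while True:` loop; the fuel is a totality guard only (each pass strictly
-- shrinks `remaining`, so the fuel part2_alt supplies never runs out)
def peelLoop (t : Int) : Nat → List (Int × Int) → Int
  | 0, remaining => t - (remaining.length : Int)
  | fuel + 1, remaining =>
    let doomed := remaining.filter (fun p =>
      decide (pvNEIGHBORS.countP
        (fun dd => decide ((p.1 + dd.1, p.2 + dd.2) ∈ remaining)) < 4))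
    if doomed = [] then t - (remaining.length : Int)
    else peelLoop t fuel (remaining.filter (fun p => decide (p ∉ doomed)))

def part2_alt (rolls : List (Int × Int)) : Int :=
  let rollsSet := PySem.Set.ofList rolls
  peelLoop (rollsSet.length : Int) (rollsSet.length + 1) rollsSet

-- ===== PRECONDITION & SPEC =====
def Spec_part2 (rolls : List (Int × Int)) (out : Int) : Prop := out = part2_alt rolls
instance (rolls : List (Int × Int)) (out : Int) : Decidable (Spec_part2 rolls out) := by unfold Spec_part2; infer_instance

-- ===== CLAIM (what is proved, stated in full; the proofs are below) =====
def Claim_equal_part2 : Prop := ∀ (rolls : List (Int × Int)), Dom_part2 rolls → Spec_part2 rolls (part2 rolls)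

-- ===== LEMMAS AND PROOFS =====

-- number of offsets dd for which f holds at p + dd ("live-neighbour degree of p under f")
def degF (f : Int × Int → Bool) (p : Int × Int) : Nat :=
  pvNEIGHBORS.countP (fun dd => f (p.1 + dd.1, p.2 + dd.2))

-- membership predicate of "still remaining": in R but not removed
def remB (R rem : List (Int × Int)) : Int × Int → Bool :=
  fun x => decide (x ∈ R) && !decide (x ∈ rem)

-- a subset of R all of whose members keep ≥ 4 neighbours inside the subset
def GoodSet (R S : List (Int × Int)) : Prop :=
  (∀ x ∈ S, x ∈ R) ∧ ∀ p ∈ S, 4 ≤ degF (fun x => decide (x ∈ S)) p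

lemma contains_eq_decide (s : List (Int × Int)) (x : Int × Int) :
    PySem.Set.contains s x = decide (x ∈ s) := by
  by_cases h : x ∈ s
  · rw [decide_eq_true h]; exact (PySem.Set.contains_iff _ _).mpr h
  · rw [decide_eq_false h]
    exact Bool.eq_false_iff.mpr (fun hc => h ((PySem.Set.contains_iff _ _).mp hc))

lemma degF_congr (f g : Int × Int → Bool) (h : ∀ y, f y = g y) (p : Int × Int) :
    degF f p = degF g p :=
  List.countP_congr (fun dd _ => by rw [h _])

lemma degF_mono (f g : Int × Int → Bool) (h : ∀ y, f y = true → g y = true) (p : Int × Int) :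
    degF f p ≤ degF g p :=
  List.countP_mono_left (fun _ _ hdd => h _ hdd)

lemma neg_mem_pvNEIGHBORS : ∀ dd ∈ pvNEIGHBORS, (-dd.1, -dd.2) ∈ pvNEIGHBORS := by decide

lemma pvNEIGHBORS_nodup : pvNEIGHBORS.Nodup := by decide

lemma adj_symm_aux (p x : Int × Int)
    (h : ∃ dd ∈ pvNEIGHBORS, x = (p.1 + dd.1, p.2 + dd.2)) :
    ∃ dd ∈ pvNEIGHBORS, p = (x.1 + dd.1, x.2 + dd.2) := by
  obtain ⟨dd, hdd, hx⟩ := h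
  refine ⟨(-dd.1, -dd.2), neg_mem_pvNEIGHBORS dd hdd, ?_⟩
  subst hx
  obtain ⟨p1, p2⟩ := p
  simp only [Prod.mk.injEq]
  constructor <;> ring

lemma adj_symm (p x : Int × Int) :
    (∃ dd ∈ pvNEIGHBORS, x = (p.1 + dd.1, p.2 + dd.2)) ↔
      (∃ dd ∈ pvNEIGHBORS, p = (x.1 + dd.1, x.2 + dd.2)) :=
  ⟨adj_symm_aux p x, adj_symm_aux x p⟩

lemma map_add_nodup (p : Int × Int) :
    (pvNEIGHBORS.map (fun dd => (p.1 + dd.1, p.2 + dd.2))).Nodup := by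
  refine List.Nodup.map ?_ pvNEIGHBORS_nodup
  intro a b hab
  obtain ⟨a1, a2⟩ := a; obtain ⟨b1, b2⟩ := b
  simp only [Prod.mk.injEq] at hab ⊢
  omega

lemma foldl_count_if (l : List (Int × Int)) (f : Int × Int → Bool) :
    ∀ c : Int, l.foldl (fun c a => if f a then c + 1 else c) c = c + (l.countP f : Int) := by
  induction l with
  | nil => intro c; simp
  | cons a l ih =>
    intro c
    by_cases h : f a
    · rw [List.foldl_cons, if_pos h, ih, List.countP_cons, if_pos h]
      push_cast
      ring
    · rw [List.foldl_cons, if_neg h, ih, List.countP_cons, if_neg h]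
      push_cast
      ring

lemma getD_foldl_insert_fn (g : Int × Int → Int) :
    ∀ (l : List (Int × Int)) (d : PySem.Dict (Int × Int) Int) (x : Int × Int),
      (l.foldl (fun d p => d.insert p (g p)) d).getD x 0 =
        if x ∈ l then g x else d.getD x 0 := by
  intro l
  induction l with
  | nil => intro d x; simp
  | cons a l ih =>
    intro d x
    rw [List.foldl_cons, ih]
    by_cases hl : x ∈ l
    · simp [hl, List.mem_cons]
    · by_cases ha : x = a
      · subst ha
        simp [hl]
      · simp [hl, ha, PySem.Dict.getD_insert, List.mem_cons]

-- removing one live point pos lowers the offset-count by exactly the number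
-- (0 or 1) of offsets hitting pos
lemma countP_erase_point (p pos : Int × Int) (f : Int × Int → Bool) (hpos : f pos = true) :
    ∀ ds : List (Int × Int),
      (ds.map (fun dd => (p.1 + dd.1, p.2 + dd.2))).Nodup →
      ds.countP (fun dd => f (p.1 + dd.1, p.2 + dd.2) && !decide ((p.1 + dd.1, p.2 + dd.2) = pos))
        + (if ∃ dd ∈ ds, pos = (p.1 + dd.1, p.2 + dd.2) then 1 else 0)
        = ds.countP (fun dd => f (p.1 + dd.1, p.2 + dd.2)) := by
  intro ds
  induction ds with
  | nil => simp
  | cons d ds ih =>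
    intro hnd
    rw [List.map_cons, List.nodup_cons] at hnd
    have ih' := ih hnd.2
    by_cases hhit : pos = (p.1 + d.1, p.2 + d.2)
    · have hnot : ¬∃ dd ∈ ds, pos = (p.1 + dd.1, p.2 + dd.2) := by
        rintro ⟨dd, hdd, heq⟩
        exact hnd.1 (List.mem_map.mpr ⟨dd, hdd, by rw [← heq]; exact hhit⟩)
      rw [if_neg hnot] at ih'
      rw [if_pos ⟨d, List.mem_cons_self, hhit⟩]
      have hfd : f (p.1 + d.1, p.2 + d.2) = true := by rw [← hhit]; exact hpos
      have hdec : decide ((p.1 + d.1, p.2 + d.2) = pos) = true := decide_eq_true hhit.symm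
      simp only [List.countP_cons, hdec, hfd, Bool.not_true, Bool.and_false]
      simp only [Bool.false_eq_true, if_false, if_true]
      omega
    · have hne : decide ((p.1 + d.1, p.2 + d.2) = pos) = false :=
        decide_eq_false (fun h => hhit h.symm)
      have hiff : (∃ dd ∈ d :: ds, pos = (p.1 + dd.1, p.2 + dd.2)) ↔
          (∃ dd ∈ ds, pos = (p.1 + dd.1, p.2 + dd.2)) := by
        constructor
        · rintro ⟨dd, hdd, heq⟩
          rcases List.mem_cons.mp hdd with h | h
          · exact absurd (h ▸ heq) hhit
          · exact ⟨dd, h, heq⟩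
        · rintro ⟨dd, hdd, heq⟩; exact ⟨dd, List.mem_cons_of_mem _ hdd, heq⟩
      have l3 : (if ∃ dd ∈ d :: ds, pos = (p.1 + dd.1, p.2 + dd.2) then 1 else 0)
          = (if ∃ dd ∈ ds, pos = (p.1 + dd.1, p.2 + dd.2) then 1 else 0) :=
        if_congr hiff rfl rfl
      rw [l3, List.countP_cons, List.countP_cons]
      have l4 : (f (p.1 + d.1, p.2 + d.2) && !decide ((p.1 + d.1, p.2 + d.2) = pos))
          = f (p.1 + d.1, p.2 + d.2) := by
        rw [hne]
        simp
      rw [l4]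
      omega

lemma deg_remove (R rem : List (Int × Int)) (pos : Int × Int)
    (h1 : pos ∈ R) (h2 : pos ∉ rem) (p : Int × Int) :
    (degF (remB R (rem ++ [pos])) p : Int)
      = (degF (remB R rem) p : Int)
        - (if ∃ dd ∈ pvNEIGHBORS, pos = (p.1 + dd.1, p.2 + dd.2) then 1 else 0) := by
  have hpos : remB R rem pos = true := by simp [remB, h1, h2]
  have key := countP_erase_point p pos (remB R rem) hpos pvNEIGHBORS (map_add_nodup p)
  have hptwise : ∀ y : Int × Int,
      remB R (rem ++ [pos]) y = (remB R rem y && !decide (y = pos)) := by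
    intro y
    simp only [remB, List.mem_append, List.mem_singleton]
    by_cases hy : y ∈ R <;> by_cases hr : y ∈ rem <;> by_cases hp : y = pos <;>
      simp [hy, hr, hp]
  have hdeg : degF (remB R (rem ++ [pos])) p =
      pvNEIGHBORS.countP (fun dd =>
        remB R rem (p.1 + dd.1, p.2 + dd.2)
          && !decide ((p.1 + dd.1, p.2 + dd.2) = pos)) :=
    List.countP_congr (fun dd _ => by rw [hptwise _])
  rw [hdeg]
  unfold degF at key ⊢
  by_cases hex : ∃ dd ∈ pvNEIGHBORS, pos = (p.1 + dd.1, p.2 + dd.2)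
  · rw [if_pos hex] at key ⊢
    omega
  · rw [if_neg hex] at key ⊢
    omega

-- characterisation of A's inner neighbour fold: resulting counts and queue
lemma step_fold (R rem' : List (Int × Int)) (pos : Int × Int) :
    ∀ (ds : List (Int × Int)) (counts : PySem.Dict (Int × Int) Int) (q : List (Int × Int)),
      (ds.map (fun dd => (pos.1 + dd.1, pos.2 + dd.2))).Nodup →
      ((ds.foldl (part2Step R rem' pos) (counts, q)).2.length ≤ q.length + ds.length)
      ∧ (∀ x, (ds.foldl (part2Step R rem' pos) (counts, q)).1.getD x 0 =
          if x ∈ R ∧ x ∉ rem' ∧ (∃ dd ∈ ds, x = (pos.1 + dd.1, pos.2 + dd.2))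
          then counts.getD x 0 - 1 else counts.getD x 0)
      ∧ (∀ x, x ∈ (ds.foldl (part2Step R rem' pos) (counts, q)).2 ↔
          x ∈ q ∨ (x ∈ R ∧ x ∉ rem' ∧ (∃ dd ∈ ds, x = (pos.1 + dd.1, pos.2 + dd.2))
            ∧ counts.getD x 0 - 1 < 4)) := by
  intro ds
  induction ds with
  | nil =>
    intro counts q _
    refine ⟨by simp, fun x => by simp, fun x => by simp⟩
  | cons d ds ih =>
    intro counts q hnd
    rw [List.map_cons, List.nodup_cons] at hnd
    have hcond : (PySem.Set.contains R (pos.1 + d.1, pos.2 + d.2)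
        && !PySem.Set.contains rem' (pos.1 + d.1, pos.2 + d.2)) = true ↔
        ((pos.1 + d.1, pos.2 + d.2) ∈ R ∧ (pos.1 + d.1, pos.2 + d.2) ∉ rem') := by
      simp [contains_eq_decide]
    have hnomap : ∀ x : Int × Int, (∃ dd ∈ ds, x = (pos.1 + dd.1, pos.2 + dd.2)) →
        x ≠ (pos.1 + d.1, pos.2 + d.2) := by
      rintro x ⟨dd, hdd, hx⟩ hxe
      apply hnd.1
      rw [← hxe]
      exact List.mem_map.mpr ⟨dd, hdd, hx.symm⟩
    have hsplit : ∀ x : Int × Int, (∃ dd ∈ d :: ds, x = (pos.1 + dd.1, pos.2 + dd.2)) ↔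
        (x = (pos.1 + d.1, pos.2 + d.2) ∨ ∃ dd ∈ ds, x = (pos.1 + dd.1, pos.2 + dd.2)) := by
      intro x
      constructor
      · rintro ⟨dd, hdd, hx⟩
        rcases List.mem_cons.mp hdd with h | h
        · exact Or.inl (h ▸ hx)
        · exact Or.inr ⟨dd, h, hx⟩
      · rintro (h | ⟨dd, hdd, hx⟩)
        · exact ⟨d, List.mem_cons_self, h⟩
        · exact ⟨dd, List.mem_cons_of_mem _ hdd, hx⟩
    rw [List.foldl_cons]
    by_cases hc : (pos.1 + d.1, pos.2 + d.2) ∈ R ∧ (pos.1 + d.1, pos.2 + d.2) ∉ rem'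
    · have hstep : part2Step R rem' pos (counts, q) d =
          (if counts.getD (pos.1 + d.1, pos.2 + d.2) 0 - 1 < 4
            then (counts.insert (pos.1 + d.1, pos.2 + d.2)
                    (counts.getD (pos.1 + d.1, pos.2 + d.2) 0 - 1), q ++ [(pos.1 + d.1, pos.2 + d.2)])
            else (counts.insert (pos.1 + d.1, pos.2 + d.2)
                    (counts.getD (pos.1 + d.1, pos.2 + d.2) 0 - 1), q)) := by
        simp only [part2Step]
        rw [if_pos (hcond.mpr hc)]
      rw [hstep]
      by_cases hlt : counts.getD (pos.1 + d.1, pos.2 + d.2) 0 - 1 < 4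
      · rw [if_pos hlt]
        obtain ⟨ihlen, ihgetD, ihmem⟩ :=
          ih (counts.insert (pos.1 + d.1, pos.2 + d.2)
            (counts.getD (pos.1 + d.1, pos.2 + d.2) 0 - 1)) (q ++ [(pos.1 + d.1, pos.2 + d.2)]) hnd.2
        refine ⟨?_, ?_, ?_⟩
        · have e0 : (q ++ [(pos.1 + d.1, pos.2 + d.2)]).length = q.length + 1 := by simp
          rw [e0] at ihlen
          rw [List.length_cons]
          omega
        · intro x
          rw [ihgetD x]
          by_cases hx : x = (pos.1 + d.1, pos.2 + d.2)
          · subst hx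
            rw [if_neg (fun h => hnomap _ h.2.2 rfl)]
            rw [PySem.Dict.getD_insert, if_pos rfl]
            rw [if_pos ⟨hc.1, hc.2, ⟨d, List.mem_cons_self, rfl⟩⟩]
          · rw [PySem.Dict.getD_insert, if_neg hx]
            by_cases hrest : x ∈ R ∧ x ∉ rem' ∧ ∃ dd ∈ ds, x = (pos.1 + dd.1, pos.2 + dd.2)
            · rw [if_pos hrest,
                if_pos ⟨hrest.1, hrest.2.1, (hsplit x).mpr (Or.inr hrest.2.2)⟩]
            · rw [if_neg hrest]
              rw [if_neg (fun h => hrest ⟨h.1, h.2.1, by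
                rcases (hsplit x).mp h.2.2 with h' | h'
                · exact absurd h' hx
                · exact h'⟩)]
        · intro x
          rw [ihmem x]
          by_cases hx : x = (pos.1 + d.1, pos.2 + d.2)
          · subst hx
            constructor
            · intro _
              exact Or.inr ⟨hc.1, hc.2, ⟨d, List.mem_cons_self, rfl⟩, hlt⟩
            · intro _
              exact Or.inl (List.mem_append.mpr (Or.inr (List.mem_singleton.mpr rfl)))
          · have hq1 : x ∈ q ++ [(pos.1 + d.1, pos.2 + d.2)] ↔ x ∈ q := by
              simp [List.mem_append, hx]
            rw [hq1]
            have hgd : (counts.insert (pos.1 + d.1, pos.2 + d.2)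
                (counts.getD (pos.1 + d.1, pos.2 + d.2) 0 - 1)).getD x 0 = counts.getD x 0 := by
              rw [PySem.Dict.getD_insert, if_neg hx]
            rw [hgd]
            constructor
            · rintro (h | ⟨ha, hb, hcnt, hd4⟩)
              · exact Or.inl h
              · exact Or.inr ⟨ha, hb, (hsplit x).mpr (Or.inr hcnt), hd4⟩
            · rintro (h | ⟨ha, hb, hcnt, hd4⟩)
              · exact Or.inl h
              · refine Or.inr ⟨ha, hb, ?_, hd4⟩
                rcases (hsplit x).mp hcnt with h' | h'
                · exact absurd h' hx
                · exact h'
      · rw [if_neg hlt]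
        obtain ⟨ihlen, ihgetD, ihmem⟩ :=
          ih (counts.insert (pos.1 + d.1, pos.2 + d.2)
            (counts.getD (pos.1 + d.1, pos.2 + d.2) 0 - 1)) q hnd.2
        refine ⟨?_, ?_, ?_⟩
        · rw [List.length_cons]
          omega
        · intro x
          rw [ihgetD x]
          by_cases hx : x = (pos.1 + d.1, pos.2 + d.2)
          · subst hx
            rw [if_neg (fun h => hnomap _ h.2.2 rfl)]
            rw [PySem.Dict.getD_insert, if_pos rfl]
            rw [if_pos ⟨hc.1, hc.2, ⟨d, List.mem_cons_self, rfl⟩⟩]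
          · rw [PySem.Dict.getD_insert, if_neg hx]
            by_cases hrest : x ∈ R ∧ x ∉ rem' ∧ ∃ dd ∈ ds, x = (pos.1 + dd.1, pos.2 + dd.2)
            · rw [if_pos hrest,
                if_pos ⟨hrest.1, hrest.2.1, (hsplit x).mpr (Or.inr hrest.2.2)⟩]
            · rw [if_neg hrest]
              rw [if_neg (fun h => hrest ⟨h.1, h.2.1, by
                rcases (hsplit x).mp h.2.2 with h' | h'
                · exact absurd h' hx
                · exact h'⟩)]
        · intro x
          rw [ihmem x]
          by_cases hx : x = (pos.1 + d.1, pos.2 + d.2)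
          · subst hx
            have hno : ¬∃ dd ∈ ds,
                (pos.1 + d.1, pos.2 + d.2) = (pos.1 + dd.1, pos.2 + dd.2) :=
              fun h => hnomap _ h rfl
            constructor
            · rintro (h | ⟨_, _, hcnt, _⟩)
              · exact Or.inl h
              · exact absurd hcnt hno
            · rintro (h | ⟨_, _, _, hd4⟩)
              · exact Or.inl h
              · exact absurd hd4 hlt
          · have hgd : (counts.insert (pos.1 + d.1, pos.2 + d.2)
                (counts.getD (pos.1 + d.1, pos.2 + d.2) 0 - 1)).getD x 0 = counts.getD x 0 := by
              rw [PySem.Dict.getD_insert, if_neg hx]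
            rw [hgd]
            constructor
            · rintro (h | ⟨ha, hb, hcnt, hd4⟩)
              · exact Or.inl h
              · exact Or.inr ⟨ha, hb, (hsplit x).mpr (Or.inr hcnt), hd4⟩
            · rintro (h | ⟨ha, hb, hcnt, hd4⟩)
              · exact Or.inl h
              · refine Or.inr ⟨ha, hb, ?_, hd4⟩
                rcases (hsplit x).mp hcnt with h' | h'
                · exact absurd h' hx
                · exact h'
    · have hstep : part2Step R rem' pos (counts, q) d = (counts, q) := by
        simp only [part2Step]
        rw [if_neg (fun h => hc (hcond.mp h))]
      rw [hstep]
      obtain ⟨ihlen, ihgetD, ihmem⟩ := ih counts q hnd.2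
      refine ⟨?_, ?_, ?_⟩
      · rw [List.length_cons]
        omega
      · intro x
        rw [ihgetD x]
        by_cases hrest : x ∈ R ∧ x ∉ rem' ∧ ∃ dd ∈ ds, x = (pos.1 + dd.1, pos.2 + dd.2)
        · rw [if_pos hrest, if_pos ⟨hrest.1, hrest.2.1, (hsplit x).mpr (Or.inr hrest.2.2)⟩]
        · rw [if_neg hrest]
          rw [if_neg (fun h => hrest ⟨h.1, h.2.1, by
            rcases (hsplit x).mp h.2.2 with h' | h'
            · exact absurd (h' ▸ ⟨h.1, h.2.1⟩) hc
            · exact h'⟩)]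
      · intro x
        rw [ihmem x]
        constructor
        · rintro (h | ⟨ha, hb, hcnt, hd4⟩)
          · exact Or.inl h
          · exact Or.inr ⟨ha, hb, (hsplit x).mpr (Or.inr hcnt), hd4⟩
        · rintro (h | ⟨ha, hb, hcnt, hd4⟩)
          · exact Or.inl h
          · refine Or.inr ⟨ha, hb, ?_, hd4⟩
            rcases (hsplit x).mp hcnt with h' | h'
            · exact absurd (h' ▸ ⟨ha, hb⟩) hc
            · exact h'

-- when the queue is empty, the invariants already give the loop's postcondition
lemma loop_finish (R : List (Int × Int)) (counts : PySem.Dict (Int × Int) Int)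
    (removed : List (Int × Int))
    (h1 : removed.Nodup) (h2 : ∀ x ∈ removed, x ∈ R)
    (h3 : ∀ p, p ∈ R → p ∉ removed → counts.getD p 0 = (degF (remB R removed) p : Int))
    (h4 : ∀ p, p ∈ R → p ∉ removed → counts.getD p 0 < 4 → p ∈ ([] : List (Int × Int)))
    (h7 : ∀ S, GoodSet R S → ∀ x ∈ S, x ∉ removed) :
    removed.Nodup ∧ (∀ x ∈ removed, x ∈ R) ∧
      (∀ p, p ∈ R → p ∉ removed → 4 ≤ degF (remB R removed) p) ∧
      (∀ S, GoodSet R S → ∀ x ∈ S, x ∉ removed) := by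
  refine ⟨h1, h2, ?_, h7⟩
  intro p hp hnp
  by_contra hlt
  have hc : counts.getD p 0 < 4 := by
    rw [h3 p hp hnp]
    exact_mod_cast Nat.lt_of_not_le hlt
  exact absurd (h4 p hp hnp hc) (List.not_mem_nil)

lemma part2Loop_spec (R : List (Int × Int)) (_hR : R.Nodup) :
    ∀ (fuel : Nat) (counts : PySem.Dict (Int × Int) Int) (removed q : List (Int × Int)),
      removed.Nodup →
      (∀ x ∈ removed, x ∈ R) →
      (∀ p, p ∈ R → p ∉ removed → counts.getD p 0 = (degF (remB R removed) p : Int)) →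
      (∀ p, p ∈ R → p ∉ removed → counts.getD p 0 < 4 → p ∈ q) →
      (∀ p ∈ q, p ∈ R) →
      (∀ p ∈ q, counts.getD p 0 < 4) →
      (∀ S, GoodSet R S → ∀ x ∈ S, x ∉ removed) →
      q.length + 8 * (R.length - removed.length) ≤ fuel →
      (part2Loop R fuel counts removed q).Nodup ∧
        (∀ x ∈ part2Loop R fuel counts removed q, x ∈ R) ∧
        (∀ p, p ∈ R → p ∉ part2Loop R fuel counts removed q →
          4 ≤ degF (remB R (part2Loop R fuel counts removed q)) p) ∧
        (∀ S, GoodSet R S → ∀ x ∈ S, x ∉ part2Loop R fuel counts removed q) := by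
  intro fuel
  induction fuel with
  | zero =>
    intro counts removed q h1 h2 h3 h4 h5 h6 h7 hb
    have hq : q = [] := by
      cases q with
      | nil => rfl
      | cons a l => simp only [List.length_cons] at hb; omega
    subst hq
    simpa only [part2Loop] using loop_finish R counts removed h1 h2 h3 h4 h7
  | succ fuel ih =>
    intro counts removed q h1 h2 h3 h4 h5 h6 h7 hb
    cases q with
    | nil =>
      simpa only [part2Loop] using loop_finish R counts removed h1 h2 h3 h4 h7
    | cons pos rest =>
      by_cases hpos : pos ∈ removed
      · have hc : PySem.Set.contains removed pos = true := (PySem.Set.contains_iff _ _).mpr hpos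
        simp only [part2Loop, hc, if_true]
        apply ih counts removed rest h1 h2 h3 ?_ ?_ ?_ h7 ?_
        · intro p hp hnp hcnt
          rcases List.mem_cons.mp (h4 p hp hnp hcnt) with h | h
          · exact absurd (h ▸ hpos) hnp
          · exact h
        · exact fun p hp => h5 p (List.mem_cons_of_mem _ hp)
        · exact fun p hp => h6 p (List.mem_cons_of_mem _ hp)
        · simp only [List.length_cons] at hb; omega
      · have hposR : pos ∈ R := h5 pos List.mem_cons_self
        have hc : PySem.Set.contains removed pos = false :=
          Bool.eq_false_iff.mpr (fun h => hpos ((PySem.Set.contains_iff _ _).mp h))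
        have hrem' : PySem.Set.add removed pos = removed ++ [pos] :=
          PySem.Set.add_of_not_mem hpos
        simp only [part2Loop, hc, Bool.false_eq_true, if_false, hrem']
        obtain ⟨hlen, hgetD, hmemq⟩ :=
          step_fold R (removed ++ [pos]) pos pvNEIGHBORS counts rest (map_add_nodup pos)
        have hposmem' : pos ∈ removed ++ [pos] := by simp
        have hn1 : (removed ++ [pos]).Nodup := by
          rw [List.nodup_append]
          refine ⟨h1, List.nodup_singleton _, ?_⟩
          intro a ha b hbm
          rw [List.mem_singleton] at hbm
          intro heq
          exact hpos (by rwa [heq, hbm] at ha)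
        have hn2 : ∀ x ∈ removed ++ [pos], x ∈ R := by
          intro x hx
          rcases List.mem_append.mp hx with h | h
          · exact h2 x h
          · rw [List.mem_singleton] at h; exact h ▸ hposR
        have hn7 : ∀ S, GoodSet R S → ∀ x ∈ S, x ∉ removed ++ [pos] := by
          intro S hS x hx hmem
          rcases List.mem_append.mp hmem with h | h
          · exact h7 S hS x hx h
          · rw [List.mem_singleton] at h
            subst h
            have h4le : 4 ≤ degF (fun y => decide (y ∈ S)) x := hS.2 x hx
            have hmono : degF (fun y => decide (y ∈ S)) x ≤ degF (remB R removed) x := by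
              apply degF_mono
              intro y hy
              have hyS : y ∈ S := of_decide_eq_true hy
              simp [remB, hS.1 y hyS, h7 S hS y hyS]
            have hlt4 : counts.getD x 0 < 4 := h6 x List.mem_cons_self
            rw [h3 x hposR hpos] at hlt4
            have hge : (4 : Int) ≤ (degF (remB R removed) x : Int) := by
              exact_mod_cast le_trans h4le hmono
            omega
        have hn3 : ∀ p, p ∈ R → p ∉ removed ++ [pos] →
            (pvNEIGHBORS.foldl (part2Step R (removed ++ [pos]) pos) (counts, rest)).1.getD p 0
              = (degF (remB R (removed ++ [pos])) p : Int) := by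
          intro p hpR hp'
          have hpnr : p ∉ removed := fun h => hp' (List.mem_append.mpr (Or.inl h))
          rw [hgetD p, deg_remove R removed pos hposR hpos p]
          by_cases hex : ∃ dd ∈ pvNEIGHBORS, p = (pos.1 + dd.1, pos.2 + dd.2)
          · rw [if_pos ⟨hpR, hp', hex⟩, if_pos ((adj_symm pos p).mp hex), h3 p hpR hpnr]
          · rw [if_neg (fun h => hex h.2.2),
              if_neg (fun h => hex ((adj_symm pos p).mpr h)), h3 p hpR hpnr]
            omega
        have hn4 : ∀ p, p ∈ R → p ∉ removed ++ [pos] →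
            (pvNEIGHBORS.foldl (part2Step R (removed ++ [pos]) pos) (counts, rest)).1.getD p 0 < 4 →
            p ∈ (pvNEIGHBORS.foldl (part2Step R (removed ++ [pos]) pos) (counts, rest)).2 := by
          intro p hpR hp' hcnt
          have hpnr : p ∉ removed := fun h => hp' (List.mem_append.mpr (Or.inl h))
          have hppos : p ≠ pos := fun h => hp' (h ▸ hposmem')
          rw [hgetD p] at hcnt
          by_cases hex : p ∈ R ∧ p ∉ removed ++ [pos] ∧
              ∃ dd ∈ pvNEIGHBORS, p = (pos.1 + dd.1, pos.2 + dd.2)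
          · rw [if_pos hex] at hcnt
            by_cases hlt : counts.getD p 0 < 4
            · have hmem : p ∈ pos :: rest := h4 p hpR hpnr hlt
              rcases List.mem_cons.mp hmem with h | h
              · exact absurd h hppos
              · exact (hmemq p).mpr (Or.inl h)
            · exact (hmemq p).mpr (Or.inr ⟨hex.1, hex.2.1, hex.2.2, hcnt⟩)
          · rw [if_neg hex] at hcnt
            have hmem : p ∈ pos :: rest := h4 p hpR hpnr hcnt
            rcases List.mem_cons.mp hmem with h | h
            · exact absurd h hppos
            · exact (hmemq p).mpr (Or.inl h)
        have hn5 : ∀ p ∈ (pvNEIGHBORS.foldl (part2Step R (removed ++ [pos]) pos) (counts, rest)).2,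
            p ∈ R := by
          intro p hp
          rcases (hmemq p).mp hp with h | h
          · exact h5 p (List.mem_cons_of_mem _ h)
          · exact h.1
        have hn6 : ∀ p ∈ (pvNEIGHBORS.foldl (part2Step R (removed ++ [pos]) pos) (counts, rest)).2,
            (pvNEIGHBORS.foldl (part2Step R (removed ++ [pos]) pos) (counts, rest)).1.getD p 0 < 4 := by
          intro p hp
          rw [hgetD p]
          rcases (hmemq p).mp hp with h | h
          · have := h6 p (List.mem_cons_of_mem _ h)
            split_ifs <;> omega
          · rw [if_pos ⟨h.1, h.2.1, h.2.2.1⟩]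
            exact h.2.2.2
        have hlenR : (removed ++ [pos]).length ≤ R.length :=
          (List.subperm_of_subset hn1 (fun x hx => hn2 x hx)).length_le
        have hbnd : (pvNEIGHBORS.foldl (part2Step R (removed ++ [pos]) pos) (counts, rest)).2.length
            + 8 * (R.length - (removed ++ [pos]).length) ≤ fuel := by
          have e1 : (removed ++ [pos]).length = removed.length + 1 := by simp
          have e2 : (pvNEIGHBORS : List (Int × Int)).length = 8 := by decide
          rw [e2] at hlen
          rw [e1] at hlenR ⊢
          simp only [List.length_cons] at hb
          omega
        exact ih _ _ _ hn1 hn2 hn3 hn4 hn5 hn6 hn7 hbnd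

-- initial counts: every cell of R is keyed with its full-board neighbour count
lemma getD_neighbor_counts (R : List (Int × Int)) (x : Int × Int) :
    (neighbor_counts R).getD x 0 =
      if x ∈ R then (degF (fun y => decide (y ∈ R)) x : Int) else 0 := by
  unfold neighbor_counts
  rw [getD_foldl_insert_fn, getD_foldl_insert_fn (fun _ => (0 : Int))]
  by_cases hx : x ∈ R
  · rw [if_pos hx, if_pos hx, foldl_count_if]
    rw [zero_add]
    have e : degF (fun y => decide (y ∈ R)) x =
        pvNEIGHBORS.countP (fun dd => decide ((x.1 + dd.1, x.2 + dd.2) ∈ R)) := rfl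
    rw [e]
    have e2 : pvNEIGHBORS.countP (fun dd => PySem.Set.contains R (x.1 + dd.1, x.2 + dd.2))
        = pvNEIGHBORS.countP (fun dd => decide ((x.1 + dd.1, x.2 + dd.2) ∈ R)) :=
      List.countP_congr (fun dd _ => by rw [contains_eq_decide])
    rw [e2]
  · rw [if_neg hx, if_neg hx, if_neg hx]
    exact PySem.Dict.getD_empty x 0

lemma nodup_keys_neighbor_counts (R : List (Int × Int)) :
    (neighbor_counts R).keys.Nodup := by
  unfold neighbor_counts
  apply PySem.Dict.nodup_keys_foldl_insert
  apply PySem.Dict.nodup_keys_foldl_insert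
  exact PySem.Dict.nodup_keys_empty

lemma mem_keys_neighbor_counts (R : List (Int × Int)) (x : Int × Int) :
    x ∈ (neighbor_counts R).keys ↔ x ∈ R := by
  unfold neighbor_counts
  rw [PySem.Dict.keys_foldl_insert, PySem.Dict.keys_foldl_insert, PySem.Dict.keys_empty]
  constructor
  · intro h
    rcases (PySem.Set.mem_update _ _ _).mp h with h' | h'
    · rcases (PySem.Set.mem_update _ _ _).mp h' with h'' | h''
      · exact absurd h'' (List.not_mem_nil)
      · exact h''
    · exact h'
  · intro h
    exact (PySem.Set.mem_update _ _ _).mpr (Or.inr h)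

lemma mem_q0 (R : List (Int × Int)) (x : Int × Int) :
    x ∈ ((neighbor_counts R).items.filter (fun pc => pc.2 < 4)).map (fun pc => pc.1) ↔
      (x ∈ R ∧ (neighbor_counts R).getD x 0 < 4) := by
  constructor
  · intro hx
    simp only [List.mem_map, List.mem_filter] at hx
    obtain ⟨⟨k, v⟩, ⟨hitem, hv⟩, rfl⟩ := hx
    have hget : (neighbor_counts R).get? k = some v :=
      PySem.Dict.get?_of_mem_items _ hitem (nodup_keys_neighbor_counts R)
    have hk : k ∈ R := (mem_keys_neighbor_counts R k).mp
      (PySem.Dict.mem_keys_of_mem_items _ hitem)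
    refine ⟨hk, ?_⟩
    rw [PySem.Dict.getD_eq_get?_getD, hget]
    simpa using hv
  · rintro ⟨hxR, hlt⟩
    have hk : x ∈ (neighbor_counts R).keys := (mem_keys_neighbor_counts R x).mpr hxR
    have hcont : (neighbor_counts R).contains x = true :=
      (PySem.Dict.contains_iff_mem_keys _ _).mpr hk
    rw [PySem.Dict.contains_eq_isSome_get?] at hcont
    obtain ⟨v, hv⟩ := Option.isSome_iff_exists.mp hcont
    have hitem := PySem.Dict.mem_items_of_get?_eq_some _ hv
    have hgd : (neighbor_counts R).getD x 0 = v := by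
      rw [PySem.Dict.getD_eq_get?_getD, hv]
      rfl
    simp only [List.mem_map, List.mem_filter]
    refine ⟨(x, v), ⟨hitem, ?_⟩, rfl⟩
    simp only [decide_eq_true_eq]
    rw [← hgd]
    exact hlt

-- A's result characterised by the stability properties of the removed set's complement
lemma partA_char (rolls : List (Int × Int)) :
    ∃ res : List (Int × Int),
      part2 rolls = (res.length : Int) ∧ res.Nodup ∧
        (∀ x ∈ res, x ∈ PySem.Set.ofList rolls) ∧
        (∀ p, p ∈ PySem.Set.ofList rolls → p ∉ res →
          4 ≤ degF (remB (PySem.Set.ofList rolls) res) p) ∧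
        (∀ S, GoodSet (PySem.Set.ofList rolls) S → ∀ x ∈ S, x ∉ res) := by
  have hR : (PySem.Set.ofList rolls).Nodup := PySem.Set.nodup_ofList rolls
  obtain ⟨hN, hSub, hDeg, hGood⟩ := part2Loop_spec (PySem.Set.ofList rolls) hR
    ((((neighbor_counts (PySem.Set.ofList rolls)).items.filter
        (fun pc => pc.2 < 4)).map (fun pc => pc.1)).length
      + 8 * (PySem.Set.ofList rolls).length + 1)
    (neighbor_counts (PySem.Set.ofList rolls)) []
    (((neighbor_counts (PySem.Set.ofList rolls)).items.filter
        (fun pc => pc.2 < 4)).map (fun pc => pc.1))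
    List.nodup_nil
    (by intro x hx; exact absurd hx (List.not_mem_nil))
    (by
      intro p hp _
      rw [getD_neighbor_counts (PySem.Set.ofList rolls) p, if_pos hp]
      have e := degF_congr (fun y => decide (y ∈ PySem.Set.ofList rolls))
        (remB (PySem.Set.ofList rolls) []) (fun y => by simp [remB]) p
      rw [e])
    (by
      intro p hp _ hcnt
      exact (mem_q0 (PySem.Set.ofList rolls) p).mpr ⟨hp, hcnt⟩)
    (by intro p hp; exact ((mem_q0 (PySem.Set.ofList rolls) p).mp hp).1)
    (by intro p hp; exact ((mem_q0 (PySem.Set.ofList rolls) p).mp hp).2)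
    (by intro S _ x _ hx; exact absurd hx (List.not_mem_nil))
    (by simp only [List.length_nil, Nat.sub_zero]; omega)
  exact ⟨_, by simp only [part2]; rfl, hN, hSub, hDeg, hGood⟩

-- B's loop reaches a stable set containing every good set
lemma peelLoop_spec (R : List (Int × Int)) (t : Int) :
    ∀ (fuel : Nat) (remaining : List (Int × Int)),
      remaining.length + 1 ≤ fuel →
      remaining.Nodup →
      (∀ x ∈ remaining, x ∈ R) →
      (∀ S, GoodSet R S → ∀ x ∈ S, x ∈ remaining) →
      ∃ X : List (Int × Int),
        peelLoop t fuel remaining = t - (X.length : Int) ∧ X.Nodup ∧ GoodSet R X ∧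
          (∀ S, GoodSet R S → ∀ x ∈ S, x ∈ X) := by
  intro fuel
  induction fuel with
  | zero =>
    intro remaining hf
    omega
  | succ fuel ih =>
    intro remaining hf hnd hsub hgood
    by_cases hd : remaining.filter (fun p =>
        decide (pvNEIGHBORS.countP
          (fun dd => decide ((p.1 + dd.1, p.2 + dd.2) ∈ remaining)) < 4)) = []
    · refine ⟨remaining, ?_, hnd, ⟨hsub, ?_⟩, fun S hS x hx => hgood S hS x hx⟩
      · simp [peelLoop, hd]
      · intro p hp
        have h0 := List.filter_eq_nil_iff.mp hd p hp
        simp only [decide_eq_true_eq] at h0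
        have e : degF (fun x => decide (x ∈ remaining)) p =
            pvNEIGHBORS.countP (fun dd => decide ((p.1 + dd.1, p.2 + dd.2) ∈ remaining)) := rfl
        rw [e]
        omega
    · obtain ⟨p0, hp0⟩ := List.exists_mem_of_ne_nil _ hd
      have hp0' := List.mem_filter.mp hp0
      have step_eq : peelLoop t (fuel + 1) remaining =
          peelLoop t fuel (remaining.filter (fun p => decide (p ∉ remaining.filter (fun p =>
            decide (pvNEIGHBORS.countP
              (fun dd => decide ((p.1 + dd.1, p.2 + dd.2) ∈ remaining)) < 4))))) := by
        simp only [peelLoop]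
        rw [if_neg hd]
      rw [step_eq]
      have hlt : (remaining.filter (fun p => decide (p ∉ remaining.filter (fun p =>
          decide (pvNEIGHBORS.countP
            (fun dd => decide ((p.1 + dd.1, p.2 + dd.2) ∈ remaining)) < 4))))).length
          < remaining.length := by
        apply List.length_filter_lt_length_iff_exists.mpr
        exact ⟨p0, hp0'.1, by simp [hp0]⟩
      apply ih
      · omega
      · exact hnd.filter _
      · intro x hx
        exact hsub x (List.mem_filter.mp hx).1
      · intro S hS x hx
        have hxrem : x ∈ remaining := hgood S hS x hx
        apply List.mem_filter.mpr
        refine ⟨hxrem, ?_⟩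
        simp only [decide_eq_true_eq]
        intro hxd
        have hxd' := List.mem_filter.mp hxd
        simp only [decide_eq_true_eq] at hxd'
        have h4le : 4 ≤ degF (fun y => decide (y ∈ S)) x := hS.2 x hx
        have hmono : degF (fun y => decide (y ∈ S)) x ≤
            degF (fun y => decide (y ∈ remaining)) x := by
          apply degF_mono
          intro y hy
          exact decide_eq_true (hgood S hS y (of_decide_eq_true hy))
        have hge : 4 ≤ degF (fun y => decide (y ∈ remaining)) x := le_trans h4le hmono
        have e : degF (fun y => decide (y ∈ remaining)) x =
            pvNEIGHBORS.countP (fun dd => decide ((x.1 + dd.1, x.2 + dd.2) ∈ remaining)) := rfl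
        rw [e] at hge
        omega

lemma partB_char (rolls : List (Int × Int)) :
    ∃ X : List (Int × Int),
      part2_alt rolls = ((PySem.Set.ofList rolls).length : Int) - (X.length : Int) ∧
        X.Nodup ∧ GoodSet (PySem.Set.ofList rolls) X ∧
        (∀ S, GoodSet (PySem.Set.ofList rolls) S → ∀ x ∈ S, x ∈ X) := by
  have hR : (PySem.Set.ofList rolls).Nodup := PySem.Set.nodup_ofList rolls
  obtain ⟨X, hX⟩ := peelLoop_spec (PySem.Set.ofList rolls)
    ((PySem.Set.ofList rolls).length : Int) ((PySem.Set.ofList rolls).length + 1)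
    (PySem.Set.ofList rolls) (by omega) hR
    (fun x hx => hx) (fun S hS x hx => hS.1 x hx)
  refine ⟨X, ?_, hX.2⟩
  simp only [part2_alt]
  exact hX.1

-- two stable sets contain each other, hence have equal length
lemma stable_length_eq (R X Y : List (Int × Int))
    (hXn : X.Nodup) (hYn : Y.Nodup)
    (hXg : GoodSet R X) (hYg : GoodSet R Y)
    (hXall : ∀ S, GoodSet R S → ∀ x ∈ S, x ∈ X)
    (hYall : ∀ S, GoodSet R S → ∀ x ∈ S, x ∈ Y) :
    X.length = Y.length := by
  have hXY : ∀ x ∈ X, x ∈ Y := hYall X hXg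
  have hYX : ∀ x ∈ Y, x ∈ X := hXall Y hYg
  have hperm : X.Perm Y :=
    (List.perm_ext_iff_of_nodup hXn hYn).mpr (fun a => ⟨hXY a, hYX a⟩)
  exact hperm.length_eq

-- ===== VERDICT (by name: the statement is the Claim_ definition above) =====
theorem part2_spec : Claim_equal_part2 := by
  intro rolls _
  unfold Spec_part2
  obtain ⟨res, hAeq, hresN, hresSub, hresDeg, hresGood⟩ := partA_char rolls
  obtain ⟨X, hBeq, hXN, hXg, hXall⟩ := partB_char rolls
  have hR : (PySem.Set.ofList rolls).Nodup := PySem.Set.nodup_ofList rolls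
  -- the kept set of A
  have hkeptmem : ∀ x, x ∈ (PySem.Set.ofList rolls).filter (fun x => !decide (x ∈ res)) ↔
      x ∈ PySem.Set.ofList rolls ∧ x ∉ res := by
    intro x
    rw [List.mem_filter]
    simp
  have hkeptN : ((PySem.Set.ofList rolls).filter (fun x => !decide (x ∈ res))).Nodup :=
    hR.filter _
  have hkeptg : GoodSet (PySem.Set.ofList rolls)
      ((PySem.Set.ofList rolls).filter (fun x => !decide (x ∈ res))) := by
    constructor
    · intro x hx; exact ((hkeptmem x).mp hx).1
    · intro p hp
      obtain ⟨hpR, hpnr⟩ := (hkeptmem p).mp hp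
      have hd := hresDeg p hpR hpnr
      have hcong : degF (remB (PySem.Set.ofList rolls) res) p =
          degF (fun x => decide (x ∈ (PySem.Set.ofList rolls).filter
            (fun x => !decide (x ∈ res)))) p := by
        apply degF_congr
        intro y
        by_cases hy : y ∈ (PySem.Set.ofList rolls).filter (fun x => !decide (x ∈ res))
        · obtain ⟨hy1, hy2⟩ := (hkeptmem y).mp hy
          simp [remB, hy1, hy2, hy]
        · rw [decide_eq_false hy]
          rcases not_and_or.mp (fun h => hy ((hkeptmem y).mpr h)) with h | h
          · simp [remB, h]
          · rw [not_not] at h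
            simp [remB, h]
      rw [← hcong]
      exact hd
  have hkeptall : ∀ S, GoodSet (PySem.Set.ofList rolls) S → ∀ x ∈ S,
      x ∈ (PySem.Set.ofList rolls).filter (fun x => !decide (x ∈ res)) := by
    intro S hS x hx
    exact (hkeptmem x).mpr ⟨hS.1 x hx, hresGood S hS x hx⟩
  have hlen : ((PySem.Set.ofList rolls).filter (fun x => !decide (x ∈ res))).length = X.length :=
    stable_length_eq (PySem.Set.ofList rolls) _ X hkeptN hXN hkeptg hXg hkeptall hXall
  have hresfilter : ((PySem.Set.ofList rolls).filter (fun x => decide (x ∈ res))).length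
      = res.length := by
    have hperm : ((PySem.Set.ofList rolls).filter (fun x => decide (x ∈ res))).Perm res := by
      apply (List.perm_ext_iff_of_nodup (hR.filter _) hresN).mpr
      intro a
      rw [List.mem_filter]
      simp only [decide_eq_true_eq]
      exact ⟨fun h => h.2, fun h => ⟨hresSub a h, h⟩⟩
    exact hperm.length_eq
  have hsplitlen : ((PySem.Set.ofList rolls).filter (fun x => decide (x ∈ res))).length
      + ((PySem.Set.ofList rolls).filter (fun x => !decide (x ∈ res))).length
      = (PySem.Set.ofList rolls).length := by
    have hp := (List.filter_append_perm (fun x => decide (x ∈ res))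
      (PySem.Set.ofList rolls)).length_eq
    simp only [List.length_append] at hp
    exact hp
  rw [hAeq, hBeq]
  omega
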